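-- pv_equiv track=rewrite | github.com/ashbob999/Advent-of-Code | 2017/day03.py | spiral
-- ===== SOURCE A (Python) =====
-- def spiral(n):
-- 	pos = [0, 0]
-- 	i = 1
-- 	l = 0
--
-- 	while (True):
-- 		l += 2
-- 		i += 1
-- 		pos[0] += 1
--
-- 		# right
-- 		for j in range(l - 1):
-- 			pos[1] -= 1
-- 			i += 1
-- 			if i == n:
-- 				return pos
--
-- 		# top
-- 		for j in range(l):
-- 			pos[0] -= 1
-- 			i += 1
-- 			if i == n:
-- 				return pos
--
-- 		# left
-- 		for j in range(l):
-- 			pos[1] += 1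
-- 			i += 1
-- 			if i == n:
-- 				return pos
--
-- 		# bottom
-- 		for j in range(l):
-- 			pos[0] += 1
-- 			i += 1
-- 			if i == n:
-- 				return pos
-- ===== SOURCE B (Python) =====
-- def spiral(n):
-- 	# Closed-form ring arithmetic: find the ring k with a short loop
-- 	# (O(sqrt n) instead of A's O(n) walk), then compute the offset directly.
-- 	k = 0
-- 	while n > (2 * k + 1) ** 2:
-- 		k += 1
-- 	m = n - (2 * k - 1) ** 2 - 1
-- 	if m <= 2 * k - 1:
-- 		return [k, k - 1 - m]
-- 	elif m <= 4 * k - 1: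
-- 		return [k - (m - (2 * k - 1)), -k]
-- 	elif m <= 6 * k - 1:
-- 		return [-k, -k + (m - (4 * k - 1))]
-- 	else:
-- 		return [-k + (m - (6 * k - 1)), k]
-- ===== Notes on version B (the rewrite author's own statement) =====
-- stated objective: faster
-- what changed: Replaces A's cell-by-cell walk along the spiral with ring arithmetic: a short loop finds the ring index k (minimal k with n <= (2k+1)^2), then the coordinates are computed in O(1) from the offset within the ring.
-- outside the precondition, e.g. on spiral(2): A does not finish within the time limit, B returns [1, 0]
import Mathlib
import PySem

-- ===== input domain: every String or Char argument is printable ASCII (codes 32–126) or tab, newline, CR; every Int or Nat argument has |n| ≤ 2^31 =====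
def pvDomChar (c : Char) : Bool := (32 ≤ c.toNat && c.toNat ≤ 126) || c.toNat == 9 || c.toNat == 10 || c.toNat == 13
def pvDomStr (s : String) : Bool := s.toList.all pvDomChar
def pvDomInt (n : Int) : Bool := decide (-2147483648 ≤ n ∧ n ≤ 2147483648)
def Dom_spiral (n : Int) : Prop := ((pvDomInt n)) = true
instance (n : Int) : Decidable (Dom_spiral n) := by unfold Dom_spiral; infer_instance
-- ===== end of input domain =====

-- B replaces A's O(n) cell-by-cell spiral walk by ring arithmetic (find the ring with a short
-- loop, then one O(1) offset computation); A mutates only its local list, so no visible side effects.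


-- ===== PORT A =====
-- one 'for j in range(c)' body of A: move pos by f, i += 1, return pos if i == n;
-- .inl = early return, .inr = loop finished with the new (pos, i)
def segA (f : Int × Int → Int × Int) (n : Int) : Nat → Int × Int → Int → ((Int × Int) ⊕ ((Int × Int) × Int))
  | 0, pos, i => Sum.inr (pos, i)
  | c + 1, pos, i =>
      let pos := f pos
      let i := i + 1
      if i = n then Sum.inl pos else segA f n c pos i

-- A's 'while True' loop; the fuel only makes it total in Lean (A diverges where it runs out;
-- for every n satisfying Pre_spiral the fuel n.toNat+1 is more than enough, proved below)
def loopA (n : Int) : Nat → Int × Int → Int → Int → List Int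
  | 0, _, _, _ => []
  | f + 1, pos, i, l =>
      let l := l + 2
      let i := i + 1
      let pos := (pos.1 + 1, pos.2)
      match segA (fun p => (p.1, p.2 - 1)) n (l - 1).toNat pos i with      -- right
      | .inl p => [p.1, p.2]
      | .inr (pos, i) =>
        match segA (fun p => (p.1 - 1, p.2)) n l.toNat pos i with          -- top
        | .inl p => [p.1, p.2]
        | .inr (pos, i) =>
          match segA (fun p => (p.1, p.2 + 1)) n l.toNat pos i with        -- left
          | .inl p => [p.1, p.2]
          | .inr (pos, i) =>
            match segA (fun p => (p.1 + 1, p.2)) n l.toNat pos i with      -- bottom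
            | .inl p => [p.1, p.2]
            | .inr (pos, i) => loopA n f pos i l

def spiral (n : Int) : List Int := loopA n (n.toNat + 1) (0, 0) 1 0

-- ===== PORT B =====
-- Source B's 'while n > (2*k+1)**2: k += 1'; fuel n.toNat makes it total (always sufficient on Pre_)
def findRing (n : Int) : Nat → Int → Int
  | 0, k => k
  | f + 1, k => if (2 * k + 1) ^ 2 < n then findRing n f (k + 1) else k

def spiral_alt (n : Int) : List Int :=
  let k := findRing n n.toNat 0
  let m := n - (2 * k - 1) ^ 2 - 1
  if m ≤ 2 * k - 1 then [k, k - 1 - m]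
  else if m ≤ 4 * k - 1 then [k - (m - (2 * k - 1)), -k]
  else if m ≤ 6 * k - 1 then [-k, -k + (m - (4 * k - 1))]
  else [-k + (m - (6 * k - 1)), k]

-- ===== PRECONDITION & SPEC =====
-- fuelled digit-by-digit integer square root (structural recursion, so it is
-- kernel-computable; fuel 33 is exact for every m < 4^33, proved below)
def sqrtNA : Nat → Nat → Nat
  | 0, _ => 0
  | f + 1, m =>
      if m < 2 then m
      else
        let r := sqrtNA f (m / 4)
        if (2 * r + 1) * (2 * r + 1) ≤ m then 2 * r + 1 else 2 * r

-- A never compares its counter to n when n ≤ 2 or when n-1 is an odd perfect square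
-- (the counter is incremented without a check at the top of each ring), so A loops forever
-- exactly there; Pre_ excludes exactly those diverging inputs.
def Pre_spiral (n : Int) : Prop :=
  3 ≤ n ∧ ¬(sqrtNA 33 (n - 1).toNat * sqrtNA 33 (n - 1).toNat = (n - 1).toNat ∧
            sqrtNA 33 (n - 1).toNat % 2 = 1)
instance (n : Int) : Decidable (Pre_spiral n) := by unfold Pre_spiral; infer_instance
def pvWitness_spiral : Int := 3

def Spec_spiral (n : Int) (out : List Int) : Prop := out = spiral_alt n
instance (n : Int) (out : List Int) : Decidable (Spec_spiral n out) := by unfold Spec_spiral; infer_instance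

-- ===== CLAIM (what is proved, stated in full; the proofs are below) =====
def Claim_equal_spiral : Prop := ∀ (n : Int), Dom_spiral n → Pre_spiral n → Spec_spiral n (spiral n)

-- ===== LEMMAS AND PROOFS =====

-- the four-branch ring formula (proof-side name for B's arithmetic at ring k)
def ringForm (n k : Int) : List Int :=
  let m := n - (2 * k - 1) ^ 2 - 1
  if m ≤ 2 * k - 1 then [k, k - 1 - m]
  else if m ≤ 4 * k - 1 then [k - (m - (2 * k - 1)), -k]
  else if m ≤ 6 * k - 1 then [-k, -k + (m - (4 * k - 1))]
  else [-k + (m - (6 * k - 1)), k]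

lemma segA_none (f : Int × Int → Int × Int) (n : Int) :
    ∀ (c : Nat) (pos : Int × Int) (i : Int), (n ≤ i ∨ i + c < n) →
      segA f n c pos i = Sum.inr (f^[c] pos, i + c) := by
  intro c
  induction c with
  | zero => intro pos i _; simp [segA]
  | succ c ih =>
      intro pos i h
      have hne : ¬ (i + 1 = n) := by push_cast at h ⊢; omega
      simp only [segA, hne, if_false]
      rw [ih (f pos) (i + 1) (by push_cast at h ⊢; omega)]
      have ec : i + ((c + 1 : Nat) : Int) = i + 1 + (c : Int) := by push_cast; ring
      rw [ec, Function.iterate_succ_apply]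

lemma segA_some (f : Int × Int → Int × Int) (n : Int) :
    ∀ (c : Nat) (pos : Int × Int) (i : Int), i < n → n ≤ i + c →
      segA f n c pos i = Sum.inl (f^[(n - i).toNat] pos) := by
  intro c
  induction c with
  | zero => intro pos i h1 h2; exfalso; push_cast at h2; omega
  | succ c ih =>
      intro pos i h1 h2
      by_cases he : i + 1 = n
      · have : (n - i).toNat = 1 := by omega
        simp [segA, he, this]
      · have hlt : i + 1 < n := by omega
        simp only [segA, he, if_false]
        rw [ih (f pos) (i + 1) hlt (by push_cast at h2 ⊢; omega)]
        have : (n - i).toNat = (n - (i + 1)).toNat + 1 := by omega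
        rw [this, Function.iterate_succ_apply]

lemma itR : ∀ (j : Nat) (a b : Int), (fun p : Int × Int => (p.1, p.2 - 1))^[j] (a, b) = (a, b - j) := by
  intro j
  induction j with
  | zero => intro a b; simp
  | succ j ih => intro a b; rw [Function.iterate_succ_apply]; simp only []; rw [ih]; push_cast; ring_nf
lemma itT : ∀ (j : Nat) (a b : Int), (fun p : Int × Int => (p.1 - 1, p.2))^[j] (a, b) = (a - j, b) := by
  intro j
  induction j with
  | zero => intro a b; simp
  | succ j ih => intro a b; rw [Function.iterate_succ_apply]; simp only []; rw [ih]; push_cast; ring_nf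
lemma itL : ∀ (j : Nat) (a b : Int), (fun p : Int × Int => (p.1, p.2 + 1))^[j] (a, b) = (a, b + j) := by
  intro j
  induction j with
  | zero => intro a b; simp
  | succ j ih => intro a b; rw [Function.iterate_succ_apply]; simp only []; rw [ih]; push_cast; ring_nf
lemma itB : ∀ (j : Nat) (a b : Int), (fun p : Int × Int => (p.1 + 1, p.2))^[j] (a, b) = (a + j, b) := by
  intro j
  induction j with
  | zero => intro a b; simp
  | succ j ih => intro a b; rw [Function.iterate_succ_apply]; simp only []; rw [ih]; push_cast; ring_nf

lemma loopA_hit (n : Int) (f : Nat) (k : Int) (hk : 1 ≤ k)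
    (hlo : (2 * k - 1) ^ 2 + 2 ≤ n) (hhi : n ≤ (2 * k + 1) ^ 2) :
    loopA n (f + 1) (k - 1, k - 1) ((2 * k - 1) ^ 2) (2 * k - 2) = ringForm n k := by
  have hq : (2 * k + 1) ^ 2 = (2 * k - 1) ^ 2 + 8 * k := by ring
  rw [hq] at hhi
  simp only [loopA, ringForm]
  have e0 : 2 * k - 2 + 2 = 2 * k := by ring
  have e2 : k - 1 + 1 = k := by ring
  rw [e0, e2]
  set q := (2 * k - 1) ^ 2 with hqd
  clear_value q
  have c1 : ((2 * k - 1).toNat : Int) = 2 * k - 1 := Int.toNat_of_nonneg (by omega)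
  have c2 : ((2 * k).toNat : Int) = 2 * k := Int.toNat_of_nonneg (by omega)
  by_cases h1 : n - q - 1 ≤ 2 * k - 1
  · rw [segA_some _ n _ _ _ (by omega) (by rw [c1]; omega), itR]
    have t1 : ((n - (q + 1)).toNat : Int) = n - (q + 1) := Int.toNat_of_nonneg (by omega)
    rw [t1]
    simp only []
    rw [if_pos h1]
    simp only [List.cons.injEq, true_and, and_true]; ring
  · rw [segA_none _ n _ _ _ (Or.inr (by rw [c1]; omega))]
    rw [itR, c1]
    have e3 : k - 1 - (2 * k - 1) = -k := by ring
    have e4 : q + 1 + (2 * k - 1) = q + 2 * k := by ring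
    rw [e3, e4]
    simp only []
    by_cases h2 : n - q - 1 ≤ 4 * k - 1
    · rw [segA_some _ n _ _ _ (by omega) (by rw [c2]; omega), itT]
      have t2 : ((n - (q + 2 * k)).toNat : Int) = n - (q + 2 * k) := Int.toNat_of_nonneg (by omega)
      rw [t2]
      simp only []
      rw [if_neg h1, if_pos h2]
      simp only [List.cons.injEq, and_true]; ring
    · rw [segA_none _ n _ _ _ (Or.inr (by rw [c2]; omega))]
      rw [itT, c2]
      have e5 : k - 2 * k = -k := by ring
      have e6 : q + 2 * k + 2 * k = q + 4 * k := by ring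
      rw [e5, e6]
      simp only []
      by_cases h3 : n - q - 1 ≤ 6 * k - 1
      · rw [segA_some _ n _ _ _ (by omega) (by rw [c2]; omega), itL]
        have t3 : ((n - (q + 4 * k)).toNat : Int) = n - (q + 4 * k) := Int.toNat_of_nonneg (by omega)
        rw [t3]
        simp only []
        rw [if_neg h1, if_neg h2, if_pos h3]
        simp only [List.cons.injEq, true_and, and_true]; ring
      · rw [segA_none _ n _ _ _ (Or.inr (by rw [c2]; omega))]
        rw [itL, c2]
        have e7 : -k + 2 * k = k := by ring
        have e8 : q + 4 * k + 2 * k = q + 6 * k := by ring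
        rw [e7, e8]
        simp only []
        rw [segA_some _ n _ _ _ (by omega) (by rw [c2]; omega), itB]
        have t4 : ((n - (q + 6 * k)).toNat : Int) = n - (q + 6 * k) := Int.toNat_of_nonneg (by omega)
        rw [t4]
        simp only []
        rw [if_neg h1, if_neg h2, if_neg h3]
        simp only [List.cons.injEq, and_true]; ring

lemma loopA_skip (n : Int) (f : Nat) (k : Int) (hk : 1 ≤ k)
    (hskip : (2 * k + 1) ^ 2 + 2 ≤ n) :
    loopA n (f + 1) (k - 1, k - 1) ((2 * k - 1) ^ 2) (2 * k - 2) =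
      loopA n f (k, k) ((2 * k + 1) ^ 2) (2 * k) := by
  have hq : (2 * k + 1) ^ 2 = (2 * k - 1) ^ 2 + 8 * k := by ring
  rw [hq] at hskip ⊢
  simp only [loopA]
  have e0 : 2 * k - 2 + 2 = 2 * k := by ring
  have e2 : k - 1 + 1 = k := by ring
  rw [e0, e2]
  set q := (2 * k - 1) ^ 2 with hqd
  have c1 : ((2 * k - 1).toNat : Int) = 2 * k - 1 := Int.toNat_of_nonneg (by omega)
  have c2 : ((2 * k).toNat : Int) = 2 * k := Int.toNat_of_nonneg (by omega)
  rw [segA_none _ n _ _ _ (Or.inr (by rw [c1]; omega))]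
  rw [itR, c1]
  have e3 : k - 1 - (2 * k - 1) = -k := by ring
  have e4 : q + 1 + (2 * k - 1) = q + 2 * k := by ring
  rw [e3, e4]
  simp only []
  rw [segA_none _ n _ _ _ (Or.inr (by rw [c2]; omega))]
  rw [itT, c2]
  have e5 : k - 2 * k = -k := by ring
  have e6 : q + 2 * k + 2 * k = q + 4 * k := by ring
  rw [e5, e6]
  simp only []
  rw [segA_none _ n _ _ _ (Or.inr (by rw [c2]; omega))]
  rw [itL, c2]
  have e7 : -k + 2 * k = k := by ring
  have e8 : q + 4 * k + 2 * k = q + 6 * k := by ring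
  rw [e7, e8]
  simp only []
  rw [segA_none _ n _ _ _ (Or.inr (by rw [c2]; omega))]
  rw [itB, c2, e7]
  have e9 : q + 6 * k + 2 * k = q + 8 * k := by ring
  rw [e9]

lemma sqrtNA_correct : ∀ (f m : Nat), m < 4 ^ f →
    sqrtNA f m * sqrtNA f m ≤ m ∧ m < (sqrtNA f m + 1) * (sqrtNA f m + 1) := by
  intro f
  induction f with
  | zero => intro m h; simp at h; simp [h, sqrtNA]
  | succ f ih =>
      intro m h
      by_cases h2 : m < 2
      · simp only [sqrtNA, h2, if_true]
        constructor
        · nlinarith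
        · nlinarith
      · have hp : (4 : Nat) ^ (f + 1) = 4 * 4 ^ f := by ring
        have hm4 : m / 4 < 4 ^ f := by omega
        obtain ⟨hl, hu⟩ := ih (m / 4) hm4
        simp only [sqrtNA, h2, if_false]
        set r := sqrtNA f (m / 4) with hr
        by_cases hc : (2 * r + 1) * (2 * r + 1) ≤ m
        · simp only [hc, if_true]
          refine ⟨trivial, ?_⟩
          have : m < 4 * ((r + 1) * (r + 1)) := by omega
          nlinarith
        · simp only [hc, if_false]
          constructor
          · have h4 : 4 * (m / 4) ≤ m := by omega
            nlinarith
          · omega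

lemma sqrtNA_sq (s m : Nat) (hm : s * s = m) (hb : m < 4 ^ 33) : sqrtNA 33 m = s := by
  obtain ⟨hl, hu⟩ := sqrtNA_correct 33 m hb
  nlinarith [sq_nonneg (sqrtNA 33 m - s), sq_nonneg (s - sqrtNA 33 m)]

lemma noBad (n : Int) (hpre : Pre_spiral n) (hn31 : n ≤ 2147483649) (k : Int) (hk : 0 ≤ k) :
    n ≠ (2 * k + 1) ^ 2 + 1 := by
  intro heq
  have h1 : n - 1 = (2 * k + 1) * (2 * k + 1) := by rw [heq]; ring
  have hs : ((2 * k + 1).toNat : Int) = 2 * k + 1 := Int.toNat_of_nonneg (by omega)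
  have hmn : (2 * k + 1).toNat * (2 * k + 1).toNat = (n - 1).toNat := by
    have : ((2 * k + 1).toNat * (2 * k + 1).toNat : Int) = n - 1 := by rw [hs]; omega
    omega
  have hb : (n - 1).toNat < 4 ^ 33 := by norm_num; omega
  have h2 : sqrtNA 33 (n - 1).toNat = (2 * k + 1).toNat := sqrtNA_sq _ _ hmn hb
  refine hpre.2 ⟨by rw [h2, hmn], by rw [h2]; omega⟩

lemma findRing_min (n : Int) :
    ∀ (f : Nat) (k K : Int), (∀ j : Int, k ≤ j → j < K → (2 * j + 1) ^ 2 < n) →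
      k ≤ K → K ≤ k + f → n ≤ (2 * K + 1) ^ 2 → findRing n f k = K := by
  intro f
  induction f with
  | zero => intro k K _ h1 h2 _; simp [findRing]; omega
  | succ f ih =>
      intro k K hmin h1 h2 hK
      by_cases hc : (2 * k + 1) ^ 2 < n
      · have hne : k ≠ K := by intro he; rw [he] at hc; omega
        simp only [findRing, hc, if_true]
        apply ih (k + 1) K (fun j hj hj2 => hmin j (by omega) hj2) (by omega)
          (by push_cast at h2 ⊢; omega) hK
      · simp only [findRing, hc, if_false]
        by_contra hne
        exact hc (hmin k le_rfl (lt_of_le_of_ne h1 hne))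

lemma spiral_alt_eq_ringForm (n k : Int) (hk : 1 ≤ k)
    (hlo : (2 * k - 1) ^ 2 + 2 ≤ n) (hhi : n ≤ (2 * k + 1) ^ 2) :
    spiral_alt n = ringForm n k := by
  have hkle : k ≤ n := by nlinarith
  have hfr : findRing n n.toNat 0 = k := by
    apply findRing_min n n.toNat 0 k
    · intro j hj0 hjk
      nlinarith
    · omega
    · rw [Int.toNat_of_nonneg (by nlinarith : (0:Int) ≤ n)]; omega
    · exact hhi
  simp only [spiral_alt, ringForm, hfr]

lemma loopA_main (n : Int) (hpre : Pre_spiral n) (hn31 : n ≤ 2147483649) :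
    ∀ (f : Nat) (k : Int), 1 ≤ k → (2 * k - 1) ^ 2 + 2 ≤ n → n ≤ (2 * (k + f) - 1) ^ 2 →
      loopA n f (k - 1, k - 1) ((2 * k - 1) ^ 2) (2 * k - 2) = spiral_alt n := by
  intro f
  induction f with
  | zero =>
      intro k hk hlo hhi
      exfalso
      push_cast at hhi
      nlinarith
  | succ f ih =>
      intro k hk hlo hhi
      by_cases hc : n ≤ (2 * k + 1) ^ 2
      · rw [loopA_hit n f k hk hlo hc, spiral_alt_eq_ringForm n k hk hlo hc]
      · have h1 : (2 * k + 1) ^ 2 + 1 ≤ n := by omega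
        have h2 : (2 * k + 1) ^ 2 + 2 ≤ n := by
          have := noBad n hpre hn31 k (by omega)
          omega
        have e1 : (2 * (k + 1) - 1) ^ 2 = (2 * k + 1) ^ 2 := by ring
        have := ih (k + 1) (by omega) (by rw [e1]; exact h2)
          (by push_cast at hhi ⊢; have e2 : 2 * (k + 1 + (f:Int)) - 1 = 2 * (k + ((f:Int) + 1)) - 1 := by ring
              rw [e2]; exact hhi)
        have e4 : 2 * (k + 1) - 2 = 2 * k := by ring
        have e5 : k + 1 - 1 = k := by ring
        rw [e1, e4, e5] at this
        rw [loopA_skip n f k hk h2]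
        exact this

-- ===== VERDICT (by name: the statement is the Claim_ definition above) =====
theorem spiral_spec : Claim_equal_spiral := by
  intro n hdom hpre
  unfold Spec_spiral
  have h3 : (3 : Int) ≤ n := hpre.1
  have hn : ((n.toNat : Int)) = n := Int.toNat_of_nonneg (by omega)
  have : spiral n = loopA n (n.toNat + 1) (1 - 1, 1 - 1) ((2 * 1 - 1) ^ 2) (2 * 1 - 2) := by
    simp [spiral]
  rw [this]
  have hn31 : n ≤ 2147483649 := by
    have hd := of_decide_eq_true hdom
    unfold pvDomInt at hd
    omega
  apply loopA_main n hpre hn31 (n.toNat + 1) 1 le_rfl (by norm_num; omega)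
  push_cast
  rw [hn]
  nlinarith
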